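-- pv_equiv track=rewrite | github.com/daniel-murse/S-GAIN | utils/analysis.py | prepare_data_params
-- ===== SOURCE A (Python) =====
-- def prepare_data_params(modality, x=None):
--     """Prepare the data parameters:
--     (1) Recapitalize the modality (after sorting).
--     (2) Distinguish the labels (optional).
--     (3) Get the primary and secondary colors.
--
--     :param modality: the modality
--     :param x: the labels
--
--     :return:
--     - modality: the (recapitalized) modality
--     - x: the (distinct) labels
--     - primary_color: the primary color
--     - secondary_color: the secondary color
--     """
--
--     # Todo expand for different settings (not only modality)
--     if modality == 'dense':
--         primary_color = 'black'
--         secondary_color = 'dimgray'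
--     elif modality == 'random':
--         if x is not None: x = [f' {x} ' for x in x]
--         primary_color = 'tab:orange'
--         secondary_color = 'orange'
--     elif modality == 'er':
--         modality = 'ER'
--         if x is not None: x = [f'  {x}  ' for x in x]
--         primary_color = 'tab:red'
--         secondary_color = 'pink'
--     elif modality == 'errw':
--         modality = 'ERRW'
--         if x is not None: x = [f'   {x}   ' for x in x]
--         primary_color = 'tab:purple'
--         secondary_color = 'mediumorchid'
--     else:
--         if x is not None: x = [f'    {x}    ' for x in x]
--         primary_color = 'tab:green'
--         secondary_color = 'limegreen'
--
--     return modality, x, primary_color, secondary_color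
-- ===== SOURCE B (Python) =====
-- _ORDER = ('dense', 'random', 'er', 'errw')
-- _PRIMARY = ('black', 'tab:orange', 'tab:red', 'tab:purple', 'tab:green')
-- _SECONDARY = ('dimgray', 'orange', 'pink', 'mediumorchid', 'limegreen')
--
--
-- def prepare_data_params(modality, x=None):
--     # Everything is derived from one rank k = the modality's position in the
--     # sparsity order (unknown modalities rank last): the display name is the
--     # upper-cased modality exactly for ranks 2-3, the labels are centered in a
--     # field widened by 2*k spaces (k per side; k = 0 leaves them unchanged),
--     # and both colors are picked by rank from parallel palettes.
--     k = _ORDER.index(modality) if modality in _ORDER else 4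
--     if 2 <= k <= 3:
--         modality = modality.upper()
--     if x is not None:
--         x = [label.center(len(label) + 2 * k) for label in x]
--     return modality, x, _PRIMARY[k], _SECONDARY[k]
-- ===== Notes on version B (the rewrite author's own statement) =====
-- stated objective: alternative
-- what changed: Instead of A's if/elif chain with a hand-written branch per modality, B computes one rank k (the modality's position in the sparsity order, 4 if unknown) and derives everything from it: the display name is modality.upper() exactly for ranks 2-3, labels are centered in a field widened by 2*k (k spaces per side, k=0 a no-op), and both colors are indexed by k from parallel palettes.
import Mathlib
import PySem

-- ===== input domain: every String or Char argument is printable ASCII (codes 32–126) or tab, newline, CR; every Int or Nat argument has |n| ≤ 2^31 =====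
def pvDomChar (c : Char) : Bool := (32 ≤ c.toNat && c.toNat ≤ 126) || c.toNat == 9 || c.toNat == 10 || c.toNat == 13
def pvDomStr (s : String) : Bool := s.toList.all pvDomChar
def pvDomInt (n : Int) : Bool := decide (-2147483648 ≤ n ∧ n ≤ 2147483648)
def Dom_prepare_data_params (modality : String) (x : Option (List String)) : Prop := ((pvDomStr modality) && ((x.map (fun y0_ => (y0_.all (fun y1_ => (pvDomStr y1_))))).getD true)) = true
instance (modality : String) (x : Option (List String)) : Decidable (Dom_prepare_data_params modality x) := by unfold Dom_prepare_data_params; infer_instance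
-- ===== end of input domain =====

-- B derives the display name, padding width and colors from one rank (position in the sparsity order) instead of A's per-modality branches (alternative).

-- ===== PORT A =====
def prepare_data_params (modality : String) (x : Option (List String)) : String × Option (List String) × String × String :=
  if modality == "dense" then
    (modality, x, "black", "dimgray")
  else if modality == "random" then
    let x := match x with
      | some xs => some (xs.map (fun s => " " ++ s ++ " "))
      | none => none
    (modality, x, "tab:orange", "orange")
  else if modality == "er" then
    let modality := "ER"
    let x := match x with
      | some xs => some (xs.map (fun s => "  " ++ s ++ "  "))
      | none => none
    (modality, x, "tab:red", "pink")
  else if modality == "errw" then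
    let modality := "ERRW"
    let x := match x with
      | some xs => some (xs.map (fun s => "   " ++ s ++ "   "))
      | none => none
    (modality, x, "tab:purple", "mediumorchid")
  else
    let x := match x with
      | some xs => some (xs.map (fun s => "    " ++ s ++ "    "))
      | none => none
    (modality, x, "tab:green", "limegreen")

-- ===== PORT B =====
-- label.center(w), ported by hand: exact for the even margins B uses
-- (w - len(label) = 2*k, so Python pads marg/2 = k spaces on each side).
def pvCenter (s : String) (w : Nat) : String :=
  let n := s.toList.length
  if w ≤ n then s
  else
    let marg := w - n
    let left := marg / 2
    String.ofList (List.replicate left ' ') ++ s ++ String.ofList (List.replicate (marg - left) ' ')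

-- the module-level tuples _ORDER, _PRIMARY, _SECONDARY of Source B
def pvOrder : List String := ["dense", "random", "er", "errw"]
def pvPrimary : List String := ["black", "tab:orange", "tab:red", "tab:purple", "tab:green"]
def pvSecondary : List String := ["dimgray", "orange", "pink", "mediumorchid", "limegreen"]

def prepare_data_params_alt (modality : String) (x : Option (List String)) : String × Option (List String) × String × String :=
  let k := (PySem.List.index? pvOrder modality).getD 4
  let modality := if 2 ≤ k ∧ k ≤ 3 then PySem.Str.upper modality else modality
  let x := match x with
    | some xs => some (xs.map (fun label => pvCenter label (label.toList.length + 2 * k)))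
    | none => none
  (modality, x, pvPrimary.getD k "", pvSecondary.getD k "")

-- ===== PRECONDITION & SPEC =====
def Spec_prepare_data_params (modality : String) (x : Option (List String)) (out : String × Option (List String) × String × String) : Prop := out = prepare_data_params_alt modality x
instance (modality : String) (x : Option (List String)) (out : String × Option (List String) × String × String) : Decidable (Spec_prepare_data_params modality x out) := by unfold Spec_prepare_data_params; infer_instance

-- ===== CLAIM (what is proved, stated in full; the proofs are below) =====
def Claim_equal_prepare_data_params : Prop := ∀ (modality : String) (x : Option (List String)), Dom_prepare_data_params modality x → Spec_prepare_data_params modality x (prepare_data_params modality x)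

-- ===== LEMMAS AND PROOFS =====

theorem center0 (l : String) : pvCenter l (l.toList.length + 2 * 0) = l := by
  unfold pvCenter; simp

theorem centerS (l : String) (k : Nat) :
    pvCenter l (l.toList.length + 2 * (k + 1))
      = String.ofList (List.replicate (k + 1) ' ') ++ l ++ String.ofList (List.replicate (k + 1) ' ') := by
  unfold pvCenter
  have h1 : ¬ (l.toList.length + 2 * (k + 1) ≤ l.toList.length) := by omega
  have h2 : l.toList.length + 2 * (k + 1) - l.toList.length = 2 * (k + 1) := by omega
  have h3 : 2 * (k + 1) / 2 = k + 1 := by omega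
  simp only [h1, if_false, h2, h3]
  have h4 : 2 * (k + 1) - (k + 1) = k + 1 := by omega
  rw [h4]

theorem alt_dense (xs : List String) :
    prepare_data_params_alt "dense" (some xs)
      = ("dense", some xs, "black", "dimgray") := by
  have hk : (PySem.List.index? pvOrder "dense").getD 4 = 0 := by decide
  simp only [prepare_data_params_alt, hk]
  norm_num
  refine ⟨?_, by decide, by decide⟩
  conv_rhs => rw [← List.map_id xs]
  refine List.map_congr_left fun l _ => ?_
  have hl : l.toList.length + 2 * 0 = l.length := by simp
  rw [← hl, center0]; rfl

theorem alt_random (xs : List String) :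
    prepare_data_params_alt "random" (some xs)
      = ("random", some (xs.map (fun s => " " ++ s ++ " ")), "tab:orange", "orange") := by
  have hk : (PySem.List.index? pvOrder "random").getD 4 = 1 := by decide
  simp only [prepare_data_params_alt, hk]
  norm_num
  refine ⟨fun l _ => ?_, by decide, by decide⟩
  have hl : l.toList.length + 2 * (0 + 1) = l.length + 2 := by simp
  rw [← hl, centerS]
  rfl

theorem alt_er (xs : List String) :
    prepare_data_params_alt "er" (some xs)
      = ("ER", some (xs.map (fun s => "  " ++ s ++ "  ")), "tab:red", "pink") := by
  have hk : (PySem.List.index? pvOrder "er").getD 4 = 2 := by decide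
  simp only [prepare_data_params_alt, hk]
  norm_num
  refine ⟨by decide, fun l _ => ?_, by decide, by decide⟩
  have hl : l.toList.length + 2 * (1 + 1) = l.length + 4 := by simp
  rw [← hl, centerS]
  rfl

theorem alt_errw (xs : List String) :
    prepare_data_params_alt "errw" (some xs)
      = ("ERRW", some (xs.map (fun s => "   " ++ s ++ "   ")), "tab:purple", "mediumorchid") := by
  have hk : (PySem.List.index? pvOrder "errw").getD 4 = 3 := by decide
  simp only [prepare_data_params_alt, hk]
  norm_num
  refine ⟨by decide, fun l _ => ?_, by decide, by decide⟩
  have hl : l.toList.length + 2 * (2 + 1) = l.length + 6 := by simp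
  rw [← hl, centerS]
  rfl

theorem alt_else (m : String) (h1 : m ≠ "dense") (h2 : m ≠ "random")
    (h3 : m ≠ "er") (h4 : m ≠ "errw") (xs : List String) :
    prepare_data_params_alt m (some xs)
      = (m, some (xs.map (fun s => "    " ++ s ++ "    ")), "tab:green", "limegreen") := by
  have hg : PySem.List.index? pvOrder m = none := by
    rw [PySem.List.index?_eq_none_iff]
    simp [pvOrder, h1, h2, h3, h4]
  simp only [prepare_data_params_alt, hg, Option.getD_none]
  norm_num
  refine ⟨fun l _ => ?_, by decide, by decide⟩
  have hl : l.toList.length + 2 * (3 + 1) = l.length + 8 := by simp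
  rw [← hl, centerS]
  rfl

theorem alt_else_none (m : String) (h1 : m ≠ "dense") (h2 : m ≠ "random")
    (h3 : m ≠ "er") (h4 : m ≠ "errw") :
    prepare_data_params_alt m none = (m, none, "tab:green", "limegreen") := by
  have hg : PySem.List.index? pvOrder m = none := by
    rw [PySem.List.index?_eq_none_iff]
    simp [pvOrder, h1, h2, h3, h4]
  simp only [prepare_data_params_alt, hg, Option.getD_none]
  norm_num
  exact ⟨by decide, by decide⟩

-- ===== VERDICT (by name: the statement is the Claim_ definition above) =====
theorem prepare_data_params_spec : Claim_equal_prepare_data_params := by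
  intro modality x _
  unfold Spec_prepare_data_params
  by_cases h1 : modality = "dense"
  · subst h1
    cases x with
    | none => decide
    | some xs => rw [alt_dense]; rfl
  · by_cases h2 : modality = "random"
    · subst h2
      cases x with
      | none => decide
      | some xs => rw [alt_random]; rfl
    · by_cases h3 : modality = "er"
      · subst h3
        cases x with
        | none => decide
        | some xs => rw [alt_er]; rfl
      · by_cases h4 : modality = "errw"
        · subst h4
          cases x with
          | none => decide
          | some xs => rw [alt_errw]; rfl
        · cases x with
          | none =>
            rw [alt_else_none modality h1 h2 h3 h4]
            simp [prepare_data_params, h1, h2, h3, h4]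
          | some xs =>
            rw [alt_else modality h1 h2 h3 h4]
            simp [prepare_data_params, h1, h2, h3, h4]
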